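-- pv_equiv track=rewrite | github.com/Ivanyinfan/LeetCode | Google-2-2.py | solution
-- ===== SOURCE A (Python) =====
-- from typing import List
-- from collections import defaultdict
--
-- def solution(A:List[str]) -> int:
--     map,r = defaultdict(int),0
--     for s in A:
--         rev = s[::-1]
--         if map[rev]>0: map[rev],r=map[rev]-1,r+4
--         else: map[s]=map[s]+1
--     for k, v in map.items():
--         if k==k[::-1] and v>0:
--             r = r + 2
--             break
--     return r
-- ===== SOURCE B (Python) =====
-- from typing import List
-- from collections import Counter
--
-- def solution(A: List[str]) -> int:
--     cnt = Counter(A)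
--     r = 0
--     odd = False
--     for w, c in cnt.items():
--         rev = w[::-1]
--         if w == rev:
--             r += (c // 2) * 4
--             if c % 2:
--                 odd = True
--         elif w < rev:
--             r += min(c, cnt[rev]) * 4
--     return r + 2 if odd else r
-- ===== Notes on version B (the rewrite author's own statement) =====
-- stated objective: alternative
-- what changed: Replaces A's greedy one-pass pairing with a mutable pending-count dict by a Counter built once plus a closed-form pass over the distinct words: min(cnt[w], cnt[rev]) pairs per non-palindromic {w, rev} pair (counted once via w < rev), cnt[w]//2 pairs per palindromic word, and an odd-palindrome flag for the +2 center.
import Mathlib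
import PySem

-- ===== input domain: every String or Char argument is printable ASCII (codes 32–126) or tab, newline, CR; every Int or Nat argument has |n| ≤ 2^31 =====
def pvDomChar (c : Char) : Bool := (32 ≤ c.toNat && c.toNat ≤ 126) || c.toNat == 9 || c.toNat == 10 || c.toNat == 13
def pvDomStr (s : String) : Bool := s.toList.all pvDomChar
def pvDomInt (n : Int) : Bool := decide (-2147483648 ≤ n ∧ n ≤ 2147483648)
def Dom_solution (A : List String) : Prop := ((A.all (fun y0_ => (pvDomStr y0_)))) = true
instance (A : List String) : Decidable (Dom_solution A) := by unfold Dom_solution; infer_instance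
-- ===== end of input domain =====

-- B replaces A's greedy one-pass pairing (mutable pending dict) by a Counter built once and a
-- closed-form pass over the distinct words; same cost class, different decomposition.

-- s[::-1] (used by both Pythons); slicing with step -1 never raises, so getD "" is never taken
def pyRev (s : String) : String := (PySem.Str.slice? s none none (-1)).getD ""

-- ===== PORT A =====
-- the loop body of A's first 'for s in A'; reading map[rev] on a defaultdict inserts rev with 0
def solutionStep (st : PySem.Dict String Int × Int) (s : String) : PySem.Dict String Int × Int :=
  let m := st.1
  let r := st.2
  let rev := pyRev s
  let m := if m.contains rev then m else m.insert rev 0   -- defaultdict access map[rev]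
  if m.getD rev 0 > 0 then (m.insert rev (m.getD rev 0 - 1), r + 4)
  else (m.insert s (m.getD s 0 + 1), r)

def solution (A : List String) : Int :=
  let st := A.foldl solutionStep (PySem.Dict.empty, 0)
  -- second loop: r = r + 2 on the first palindromic key with v > 0, then break
  if st.1.items.any (fun kv => kv.1 == pyRev kv.1 && decide (kv.2 > 0)) then st.2 + 2 else st.2

-- ===== PORT B =====
def solution_alt (A : List String) : Int :=
  let cnt := PySem.Dict.counter A
  let res := cnt.items.foldl
    (fun (acc : Int × Bool) (kv : String × Int) =>
      let w := kv.1
      let c := kv.2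
      let rev := pyRev w
      if w = rev then
        (acc.1 + PySem.Int.floordiv c 2 * 4, if PySem.Int.mod c 2 ≠ 0 then true else acc.2)
      else if w < rev then (acc.1 + min c (cnt.getD rev 0) * 4, acc.2)
      else acc) (0, false)
  if res.2 then res.1 + 2 else res.1

-- ===== PRECONDITION & SPEC =====
def Spec_solution (A : List String) (out : Int) : Prop := out = solution_alt A
instance (A : List String) (out : Int) : Decidable (Spec_solution A out) := by unfold Spec_solution; infer_instance

-- ===== CLAIM (what is proved, stated in full; the proofs are below) =====
def Claim_equal_solution : Prop := ∀ (A : List String), Dom_solution A → Spec_solution A (solution A)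

-- ===== LEMMAS AND PROOFS =====
theorem pyRev_eq (s : String) : pyRev s = String.ofList s.toList.reverse := by
  simp [pyRev, PySem.Str.slice?_none_none_neg_one]
theorem pyRev_pyRev (s : String) : pyRev (pyRev s) = s := by
  rw [pyRev_eq, pyRev_eq, String.toList_ofList, List.reverse_reverse, String.ofList_toList]
def cInt (l : List String) (w : String) : Int := (l.count w : Int)
theorem cInt_append (l : List String) (s w : String) :
    cInt (l ++ [s]) w = cInt l w + if w = s then 1 else 0 := by
  simp [cInt, List.count_append, List.count_singleton]
  split <;> simp_all [eq_comm]
theorem sum_map_diff1 (d : List String) (hnd : d.Nodup) (f g : String → Int) (s : String)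
    (h : ∀ w, w ≠ s → f w = g w) :
    (d.map f).sum = (d.map g).sum + (if s ∈ d then f s - g s else 0) := by
  induction d with
  | nil => simp
  | cons x d ih =>
    rw [List.nodup_cons] at hnd
    rcases hnd with ⟨hx, hnd⟩
    have ih' := ih hnd
    by_cases hxs : x = s
    · subst hxs
      simp [hx, ih']
      ring
    · simp only [List.map_cons, List.sum_cons, ih', h x hxs, List.mem_cons, Ne.symm hxs,
        false_or]
      split <;> ring
theorem sum_map_diff2 (d : List String) (hnd : d.Nodup) (f g : String → Int) (s t : String)
    (hst : s ≠ t) (h : ∀ w, w ≠ s → w ≠ t → f w = g w) :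
    (d.map f).sum = (d.map g).sum + (if s ∈ d then f s - g s else 0)
      + (if t ∈ d then f t - g t else 0) := by
  induction d with
  | nil => simp
  | cons x d ih =>
    rw [List.nodup_cons] at hnd
    rcases hnd with ⟨hx, hnd⟩
    have ih' := ih hnd
    by_cases hxs : x = s
    · subst hxs
      simp only [List.map_cons, List.sum_cons, ih', List.mem_cons, true_or, if_pos, hx,
        Ne.symm hst, false_or]
      simp [hx]
      split <;> ring
    · by_cases hxt : x = t
      · subst hxt
        simp [hx, Ne.symm hxs, ih']
        split <;> ring
      · simp only [List.map_cons, List.sum_cons, ih', h x hxs hxt, List.mem_cons,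
          Ne.symm hxs, Ne.symm hxt, false_or]
        split <;> split <;> ring
def pendVal (l : List String) (w : String) : Int :=
  if pyRev w = w then cInt l w % 2 else max (cInt l w - cInt l (pyRev w)) 0
def tval (l : List String) (w : String) : Int :=
  if pyRev w = w then cInt l w / 2 * 4
  else if w < pyRev w then min (cInt l w) (cInt l (pyRev w)) * 4
  else 0
theorem cInt_nonneg (l : List String) (w : String) : 0 ≤ cInt l w := by simp [cInt]


theorem cInt_append_self (l : List String) (s : String) : cInt (l ++ [s]) s = cInt l s + 1 := by
  simp [cInt_append]

theorem cInt_append_other (l : List String) {s v : String} (hv : v ≠ s) :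
    cInt (l ++ [s]) v = cInt l v := by
  simp [cInt_append, hv]

theorem pendVal_append_other (l : List String) {s w : String} (hws : w ≠ s)
    (hw : w ≠ pyRev s) : pendVal (l ++ [s]) w = pendVal l w := by
  have hrw : pyRev w ≠ s := fun hc => hw (by rw [← hc, pyRev_pyRev])
  unfold pendVal
  by_cases hpw : pyRev w = w
  · rw [if_pos hpw, if_pos hpw, cInt_append_other l hws]
  · rw [if_neg hpw, if_neg hpw, cInt_append_other l hws, cInt_append_other l hrw]

theorem pendVal_append_pos (l : List String) (s : String) (h : pendVal l (pyRev s) > 0) (w : String) :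
    pendVal (l ++ [s]) w = if w = pyRev s then pendVal l (pyRev s) - 1 else pendVal l w := by
  have hrr := pyRev_pyRev s
  by_cases hpal : pyRev s = s
  · rw [hpal] at h ⊢
    by_cases hws : w = s
    · subst hws
      rw [if_pos rfl]
      unfold pendVal at h ⊢
      rw [if_pos hpal] at h
      rw [if_pos hpal, if_pos hpal, cInt_append_self]
      omega
    · rw [if_neg hws, pendVal_append_other l hws (by rw [hpal]; exact hws)]
  · by_cases hw : w = pyRev s
    · subst hw
      rw [if_pos rfl]
      have hcond : ¬ pyRev (pyRev s) = pyRev s := by rw [hrr]; exact fun hc => hpal hc.symm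
      unfold pendVal at h ⊢
      rw [if_neg hcond, hrr] at h
      rw [if_neg hcond, hrr, cInt_append_self, cInt_append_other l hpal,
        if_neg (show ¬ s = pyRev s from fun hc => hpal hc.symm)]
      omega
    · rw [if_neg hw]
      by_cases hws : w = s
      · subst hws
        have hcond : ¬ pyRev w = w := hpal
        unfold pendVal at h ⊢
        rw [if_neg (by rw [hrr]; exact fun hc => hpal hc.symm : ¬ pyRev (pyRev w) = pyRev w),
          hrr] at h
        rw [if_neg hcond, if_neg hcond, cInt_append_self, cInt_append_other l hpal]
        omega
      · exact pendVal_append_other l hws hw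

theorem pendVal_append_zero (l : List String) (s : String) (h : ¬ pendVal l (pyRev s) > 0) (w : String) :
    pendVal (l ++ [s]) w = if w = s then pendVal l s + 1 else pendVal l w := by
  have hrr := pyRev_pyRev s
  by_cases hws : w = s
  · subst hws
    rw [if_pos rfl]
    by_cases hpal : pyRev w = w
    · rw [hpal] at h
      unfold pendVal at h ⊢
      rw [if_pos hpal] at h
      rw [if_pos hpal, if_pos hpal, cInt_append_self]
      have := cInt_nonneg l w
      omega
    · have hcond : ¬ pyRev (pyRev w) = pyRev w := by
        rw [hrr]; exact fun hc => hpal hc.symm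
      unfold pendVal at h ⊢
      rw [if_neg hcond, hrr] at h
      rw [if_neg hpal, if_neg hpal, cInt_append_self,
        cInt_append_other l (fun hc : pyRev w = w => hpal hc)]
      omega
  · by_cases hw : w = pyRev s
    · subst hw
      rw [if_neg hws]
      have hpal : ¬ pyRev s = s := fun hc => hws hc
      have hcond : ¬ pyRev (pyRev s) = pyRev s := by rw [hrr]; exact fun hc => hpal hc.symm
      unfold pendVal at h ⊢
      rw [if_neg hcond, hrr] at h
      rw [if_neg hcond, if_neg hcond, hrr, cInt_append_self, cInt_append_other l hpal]
      omega
    · rw [if_neg hws]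
      exact pendVal_append_other l hws hw
def gval (l : List String) : Int := ((PySem.Set.ofList l).map (tval l)).sum

theorem cInt_eq_zero_of_not_mem {l : List String} {w : String} (h : w ∉ l) : cInt l w = 0 := by
  simp [cInt, List.count_eq_zero_of_not_mem h]

theorem tval_append_other (l : List String) {s w : String} (hws : w ≠ s)
    (hw : w ≠ pyRev s) : tval (l ++ [s]) w = tval l w := by
  have hrw : pyRev w ≠ s := fun hc => hw (by rw [← hc, pyRev_pyRev])
  unfold tval
  by_cases hpw : pyRev w = w
  · rw [if_pos hpw, if_pos hpw, cInt_append_other l hws]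
  · rw [if_neg hpw, if_neg hpw]
    by_cases hlt : w < pyRev w
    · rw [if_pos hlt, if_pos hlt, cInt_append_other l hws, cInt_append_other l hrw]
    · rw [if_neg hlt, if_neg hlt]

theorem gval_append (l : List String) (s : String) :
    gval (l ++ [s]) = gval l + (if pendVal l (pyRev s) > 0 then 4 else 0) := by
  have hrr := pyRev_pyRev s
  have hnd : (PySem.Set.ofList l).Nodup := PySem.Set.nodup_ofList l
  have hadd : PySem.Set.ofList (l ++ [s]) = PySem.Set.add (PySem.Set.ofList l) s :=
    PySem.Set.ofList_append_singleton l s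
  unfold gval
  rw [hadd]
  by_cases hpal : pyRev s = s
  · -- palindromic s: only the term at s changes
    rw [hpal]
    have hstab : ∀ w, w ≠ s → tval (l ++ [s]) w = tval l w := fun w hws =>
      tval_append_other l hws (by rw [hpal]; exact hws)
    have hfs : tval (l ++ [s]) s = (cInt l s + 1) / 2 * 4 := by
      unfold tval
      rw [if_pos hpal, cInt_append_self]
    have hgs : tval l s = cInt l s / 2 * 4 := by
      unfold tval
      rw [if_pos hpal]
    have hp : pendVal l s = cInt l s % 2 := by
      unfold pendVal
      rw [if_pos hpal]
    by_cases hmem : s ∈ PySem.Set.ofList l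
    · rw [PySem.Set.add_of_mem hmem,
        sum_map_diff1 _ hnd (tval (l ++ [s])) (tval l) s hstab, if_pos hmem, hfs, hgs, hp]
      split_ifs <;> omega
    · rw [PySem.Set.add_of_not_mem hmem, List.map_append, List.sum_append,
        sum_map_diff1 _ hnd (tval (l ++ [s])) (tval l) s hstab, if_neg hmem]
      have hc0 : cInt l s = 0 :=
        cInt_eq_zero_of_not_mem (by rwa [PySem.Set.mem_ofList] at hmem)
      rw [hp, hc0]
      simp [hfs, hc0]
  · -- non-palindromic s: the terms at s and at pyRev s change
    have hst : s ≠ pyRev s := fun hc => hpal hc.symm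
    have hstab : ∀ w, w ≠ s → w ≠ pyRev s → tval (l ++ [s]) w = tval l w := fun w hws hw =>
      tval_append_other l hws hw
    have hct : cInt (l ++ [s]) (pyRev s) = cInt l (pyRev s) := cInt_append_other l hpal
    have hfs : tval (l ++ [s]) s =
        if s < pyRev s then min (cInt l s + 1) (cInt l (pyRev s)) * 4 else 0 := by
      unfold tval
      rw [if_neg hpal, cInt_append_self, hct]
    have hgs : tval l s = if s < pyRev s then min (cInt l s) (cInt l (pyRev s)) * 4 else 0 := by
      unfold tval
      rw [if_neg hpal]
    have hpalt : ¬ pyRev (pyRev s) = pyRev s := by rw [hrr]; exact hst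
    have hft : tval (l ++ [s]) (pyRev s) =
        if pyRev s < s then min (cInt l (pyRev s)) (cInt l s + 1) * 4 else 0 := by
      unfold tval
      rw [if_neg hpalt, hrr, cInt_append_self, hct]
    have hgt : tval l (pyRev s) =
        if pyRev s < s then min (cInt l (pyRev s)) (cInt l s) * 4 else 0 := by
      unfold tval
      rw [if_neg hpalt, hrr]
    have hp : pendVal l (pyRev s) = max (cInt l (pyRev s) - cInt l s) 0 := by
      unfold pendVal
      rw [if_neg hpalt, hrr]
    have htri : s < pyRev s ∨ pyRev s < s := by
      rcases lt_trichotomy s (pyRev s) with h | h | h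
      · exact Or.inl h
      · exact absurd h hst
      · exact Or.inr h
    have hnn := cInt_nonneg l s
    have hnn2 := cInt_nonneg l (pyRev s)
    by_cases hmem : s ∈ PySem.Set.ofList l
    · rw [PySem.Set.add_of_mem hmem,
        sum_map_diff2 _ hnd (tval (l ++ [s])) (tval l) s (pyRev s) hst hstab, if_pos hmem,
        hfs, hgs, hft, hgt, hp]
      by_cases hmt : pyRev s ∈ PySem.Set.ofList l
      · rw [if_pos hmt]
        rcases htri with h | h
        · rw [if_pos h, if_pos h, if_neg (asymm h), if_neg (asymm h)]
          split_ifs <;> omega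
        · rw [if_neg (asymm h), if_neg (asymm h), if_pos h, if_pos h]
          split_ifs <;> omega
      · rw [if_neg hmt]
        have hc0 : cInt l (pyRev s) = 0 :=
          cInt_eq_zero_of_not_mem (by rwa [PySem.Set.mem_ofList] at hmt)
        rw [hc0]
        rcases htri with h | h
        · rw [if_pos h, if_pos h]
          split_ifs <;> omega
        · rw [if_neg (asymm h), if_neg (asymm h)]
          split_ifs <;> omega
    · rw [PySem.Set.add_of_not_mem hmem, List.map_append, List.sum_append,
        sum_map_diff2 _ hnd (tval (l ++ [s])) (tval l) s (pyRev s) hst hstab, if_neg hmem]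
      have hc0 : cInt l s = 0 :=
        cInt_eq_zero_of_not_mem (by rwa [PySem.Set.mem_ofList] at hmem)
      simp only [List.map_cons, List.map_nil, List.sum_cons, List.sum_nil]
      rw [hfs, hft, hgt, hp, hc0]
      by_cases hmt : pyRev s ∈ PySem.Set.ofList l
      · rw [if_pos hmt]
        rcases htri with h | h
        · rw [if_pos h, if_neg (asymm h), if_neg (asymm h)]
          split_ifs <;> omega
        · rw [if_neg (asymm h), if_pos h, if_pos h]
          split_ifs <;> omega
      · rw [if_neg hmt]
        have hc0t : cInt l (pyRev s) = 0 :=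
          cInt_eq_zero_of_not_mem (by rwa [PySem.Set.mem_ofList] at hmt)
        rw [hc0t]
        rcases htri with h | h
        · rw [if_pos h]
          split_ifs <;> omega
        · rw [if_neg (asymm h)]
          split_ifs <;> omega
theorem mem_of_cInt_pos {l : List String} {w : String} (h : 0 < cInt l w) : w ∈ l := by
  by_contra hc
  rw [cInt_eq_zero_of_not_mem hc] at h
  omega

theorem solutionStep_cases (m : PySem.Dict String Int) (r : Int) (s : String) :
    solutionStep (m, r) s =
      if (if m.contains (pyRev s) then m else m.insert (pyRev s) 0).getD (pyRev s) 0 > 0 then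
        ((if m.contains (pyRev s) then m else m.insert (pyRev s) 0).insert (pyRev s)
          ((if m.contains (pyRev s) then m else m.insert (pyRev s) 0).getD (pyRev s) 0 - 1),
          r + 4)
      else
        ((if m.contains (pyRev s) then m else m.insert (pyRev s) 0).insert s
          ((if m.contains (pyRev s) then m else m.insert (pyRev s) 0).getD s 0 + 1), r) := rfl

theorem loopA (l : List String) :
    (l.foldl solutionStep (PySem.Dict.empty, 0)).1.keys.Nodup ∧
    (∀ w, (l.foldl solutionStep (PySem.Dict.empty, 0)).1.getD w 0 = pendVal l w) ∧
    (l.foldl solutionStep (PySem.Dict.empty, 0)).2 = gval l := by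
  induction l using List.reverseRecOn with
  | nil =>
    refine ⟨PySem.Dict.nodup_keys_empty, fun w => ?_, rfl⟩
    rw [List.foldl_nil, PySem.Dict.getD_empty]
    unfold pendVal cInt
    simp
  | append_singleton l s ih =>
    rw [List.foldl_append, List.foldl_cons, List.foldl_nil]
    rcases hfold : l.foldl solutionStep (PySem.Dict.empty, 0) with ⟨m, r⟩
    rw [hfold] at ih
    obtain ⟨hnd, hg, hr⟩ := ih
    rw [solutionStep_cases m r s]
    set m1 := if m.contains (pyRev s) then m else m.insert (pyRev s) 0 with hm1def
    have hm1 : ∀ w, m1.getD w 0 = pendVal l w := by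
      intro w
      rw [hm1def]
      split_ifs with hc
      · exact hg w
      · rw [PySem.Dict.getD_insert]
        split_ifs with hw
        · rw [hw, ← hg (pyRev s),
            PySem.Dict.getD_of_not_contains m 0 (by simpa using hc)]
        · exact hg w
    have hnd1 : m1.keys.Nodup := by
      rw [hm1def]
      split_ifs
      · exact hnd
      · exact PySem.Dict.nodup_keys_insert m (pyRev s) 0 hnd
    rw [hm1 (pyRev s)]
    split_ifs with hpos
    · refine ⟨PySem.Dict.nodup_keys_insert m1 (pyRev s) _ hnd1, fun w => ?_, ?_⟩
      · rw [PySem.Dict.getD_insert, pendVal_append_pos l s hpos w]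
        split_ifs with hw
        · rfl
        · exact hm1 w
      · show r + 4 = gval (l ++ [s])
        rw [gval_append l s, if_pos hpos, show r = gval l from hr]
    · refine ⟨PySem.Dict.nodup_keys_insert m1 s _ hnd1, fun w => ?_, ?_⟩
      · rw [PySem.Dict.getD_insert, hm1 s, pendVal_append_zero l s hpos w]
        split_ifs with hw
        · rfl
        · exact hm1 w
      · show r = gval (l ++ [s])
        rw [gval_append l s, if_neg hpos, show r = gval l from hr]
        ring

def oddB (l : List String) : Bool :=
  (PySem.Set.ofList l).any (fun w => (pyRev w == w) && decide (cInt l w % 2 = 1))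

def oddPal (l : List String) : Prop := ∃ w, pyRev w = w ∧ cInt l w % 2 = 1

theorem oddB_iff (l : List String) : oddB l = true ↔ oddPal l := by
  unfold oddB oddPal
  rw [List.any_eq_true]
  constructor
  · rintro ⟨w, hw, hp⟩
    rw [Bool.and_eq_true, beq_iff_eq, decide_eq_true_iff] at hp
    exact ⟨w, hp.1, hp.2⟩
  · rintro ⟨w, hpw, hodd⟩
    have h1 : 0 < cInt l w := by
      have := cInt_nonneg l w
      omega
    refine ⟨w, ?_, ?_⟩
    · rw [PySem.Set.mem_ofList]
      exact mem_of_cInt_pos h1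
    · rw [Bool.and_eq_true, beq_iff_eq, decide_eq_true_iff]
      exact ⟨hpw, hodd⟩

theorem anyA (l : List String) (m : PySem.Dict String Int) (hnd : m.keys.Nodup)
    (hg : ∀ w, m.getD w 0 = pendVal l w) :
    (m.items.any (fun kv => kv.1 == pyRev kv.1 && decide (kv.2 > 0))) = oddB l := by
  rw [Bool.eq_iff_iff, oddB_iff, List.any_eq_true]
  constructor
  · rintro ⟨kv, hmem, hp⟩
    rw [Bool.and_eq_true, beq_iff_eq, decide_eq_true_iff] at hp
    obtain ⟨hpal, hpos⟩ := hp
    have hkv : m.getD kv.1 0 = kv.2 := by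
      rcases kv with ⟨k, v⟩
      exact PySem.Dict.getD_of_mem_items m hmem hnd 0
    have hpd := hg kv.1
    rw [hkv] at hpd
    unfold pendVal at hpd
    rw [if_pos hpal.symm] at hpd
    exact ⟨kv.1, hpal.symm, by omega⟩
  · rintro ⟨w, hpw, hodd⟩
    have hpd := hg w
    unfold pendVal at hpd
    rw [if_pos hpw, hodd] at hpd
    have hq : m.get? w = some 1 := by
      rw [PySem.Dict.getD_eq_get?_getD] at hpd
      cases hq : m.get? w with
      | none => rw [hq] at hpd; simp at hpd
      | some v =>
        rw [hq] at hpd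
        simp at hpd
        rw [hpd]
    refine ⟨(w, 1), PySem.Dict.mem_items_of_get?_eq_some m hq, ?_⟩
    simp [hpw]

theorem solution_eq (A : List String) :
    solution A = if oddB A then gval A + 2 else gval A := by
  obtain ⟨hnd, hg, hr⟩ := loopA A
  simp only [solution]
  rw [anyA A _ hnd hg, hr]

theorem solution_alt_eq (A : List String) :
    solution_alt A = if oddB A then gval A + 2 else gval A := by
  simp only [solution_alt]
  rw [PySem.Dict.items_counter, List.foldl_map]
  rw [PySem.List.foldl_congr_mem _ _
    (fun (acc : Int × Bool) (w : String) =>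
      (acc.1 + tval A w,
        if ((pyRev w == w) && decide (cInt A w % 2 = 1)) = true then true else acc.2)) _
    (fun acc w hw => ?_)]
  · rw [PySem.List.foldl_prod_mk
      (f := fun (a : Int) (w : String) => a + tval A w)
      (g := fun (b : Bool) (w : String) =>
        if ((pyRev w == w) && decide (cInt A w % 2 = 1)) = true then true else b)]
    rw [PySem.List.foldl_add, PySem.List.foldl_if_true_eq]
    simp only [Bool.false_or, zero_add]
    rfl
  · -- the loop body, rewritten with the counter lookups resolved
    dsimp only
    have hc : (0 : Int) ≤ (List.count w A : Int) := by positivity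
    by_cases hp : w = pyRev w
    · rw [if_pos hp]
      have ht : tval A w = cInt A w / 2 * 4 := by
        unfold tval
        rw [if_pos hp.symm]
      rw [ht]
      have hfd : PySem.Int.floordiv ((List.count w A : Nat) : Int) 2 = cInt A w / 2 := by
        rw [PySem.Int.floordiv_eq_ediv_of_pos (by norm_num)]
        rfl
      have hmod : PySem.Int.mod ((List.count w A : Nat) : Int) 2 = cInt A w % 2 := by
        rw [PySem.Int.mod_eq_emod_of_pos (by norm_num)]
        rfl
      rw [hfd, hmod]
      have hiff : (cInt A w % 2 ≠ 0) ↔ (((pyRev w == w) && decide (cInt A w % 2 = 1)) = true) := by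
        rw [Bool.and_eq_true, beq_iff_eq, decide_eq_true_iff]
        have : 0 ≤ cInt A w := cInt_nonneg A w
        constructor
        · intro h
          exact ⟨hp.symm, by omega⟩
        · intro h
          omega
      rw [if_congr hiff rfl rfl]
    · rw [if_neg hp]
      have hflag : ((pyRev w == w) && decide (cInt A w % 2 = 1)) = false := by
        have hb : (pyRev w == w) = false := by
          rw [beq_eq_false_iff_ne]
          exact fun hc => hp hc.symm
        rw [hb, Bool.false_and]
      rw [hflag]
      by_cases hlt : w < pyRev w
      · rw [if_pos hlt]
        have ht : tval A w = min (cInt A w) (cInt A (pyRev w)) * 4 := by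
          unfold tval
          rw [if_neg (fun hc : pyRev w = w => hp hc.symm), if_pos hlt]
        rw [ht, PySem.Dict.getD_counter]
        rfl
      · rw [if_neg hlt]
        have ht : tval A w = 0 := by
          unfold tval
          rw [if_neg (fun hc : pyRev w = w => hp hc.symm), if_neg hlt]
        rw [ht, add_zero]
        simp

-- ===== VERDICT (by name: the statement is the Claim_ definition above) =====
theorem solution_spec : Claim_equal_solution := by
  intro A _
  unfold Spec_solution
  rw [solution_eq, solution_alt_eq]
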